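-- pv_equiv track=rewrite | github.com/xph9876/RNA-mediated_DSB_repair | utils/old_code/alignment_utils_old.py | get_ref_positions
-- ===== SOURCE A (Python) =====
-- def get_ref_positions(ref_align, read_align, ref_pos):
--   """
--     Get the map from alignment indices to reference indices.
--
--     Example:
--       input:
--         ref_pos    = 1
--         ref_align  = A C G - - T C A
--         read_align = - - G G T - - C
--       output:
--         pos_map    = 1 2 3 3 3 4 5 6
--
--     Parameters
--     ----------
--     ref_align  : the alignment string for the reference sequence.
--     read_align : the alignment string for the read sequence.
--     ref_pos    : left-most position on the reference sequence that the read aligns with.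
--
--     Returns
--     -------
--     pos_map : a list with same length as ref_align.
--       pos_map[i] gives the 1-based position on reference sequence corresponding
--       with ref_align[i] and seq_align[i].
--   """
--   assert len(ref_align) == len(read_align), "Alignment strings must be the same length"
--   pos_map = []
--   for i in range(len(ref_align)):
--     if ref_align[i] == '-':
--       pos_map.append(ref_pos - 1) # insertions are mapped to the previous reference positition
--     else:
--       pos_map.append(ref_pos)
--       ref_pos += 1
--   return pos_map
-- ===== SOURCE B (Python) =====
-- def get_ref_positions(ref_align, read_align, ref_pos):
--   assert len(ref_align) == len(read_align), "Alignment strings must be the same length"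
--   # exclusive prefix count of non-gap reference characters
--   before = [0]
--   for c in ref_align:
--     before.append(before[-1] + (c != '-'))
--   return [ref_pos + before[i] - (ref_align[i] == '-') for i in range(len(ref_align))]
-- ===== Notes on version B (the rewrite author's own statement) =====
-- stated objective: alternative
-- what changed: Replaces the stateful accumulator loop (mutating ref_pos while appending) with a two-phase decomposition: precompute an exclusive prefix-count table of non-gap reference characters, then map each index to ref_pos + before[i] - gap adjustment in one comprehension.
import Mathlib
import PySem

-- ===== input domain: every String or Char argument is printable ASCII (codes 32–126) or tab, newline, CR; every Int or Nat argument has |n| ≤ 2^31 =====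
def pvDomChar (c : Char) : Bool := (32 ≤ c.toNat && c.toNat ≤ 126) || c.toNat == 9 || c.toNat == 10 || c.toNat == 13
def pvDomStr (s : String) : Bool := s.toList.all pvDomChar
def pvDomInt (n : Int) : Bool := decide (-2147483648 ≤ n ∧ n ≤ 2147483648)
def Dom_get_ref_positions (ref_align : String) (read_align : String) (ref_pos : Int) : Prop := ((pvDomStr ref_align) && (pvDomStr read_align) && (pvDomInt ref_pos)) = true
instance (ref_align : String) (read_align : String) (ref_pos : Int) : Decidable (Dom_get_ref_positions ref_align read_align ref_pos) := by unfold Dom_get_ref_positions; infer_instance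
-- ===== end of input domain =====

-- B replaces A's stateful ref_pos accumulator loop with an exclusive prefix-count table plus a single mapping pass (alternative decomposition, same cost).


-- ===== PORT A =====
-- A's loop: scan the alignment left to right, appending ref_pos (or ref_pos - 1 at a gap) and
-- incrementing ref_pos at each non-gap character.
def pvLoopA : List Char → Int → List Int
  | [], _ => []
  | c :: cs, p =>
    if c = '-' then (p - 1) :: pvLoopA cs p
    else p :: pvLoopA cs (p + 1)

def get_ref_positions (ref_align : String) (read_align : String) (ref_pos : Int) : List Int :=
  pvLoopA ref_align.toList ref_pos

-- ===== PORT B =====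
-- B: exclusive prefix counts of non-gap chars, then one mapping pass.
def pvBefore : List Char → Int → List Int
  | [], _ => []
  | c :: cs, acc => acc :: pvBefore cs (acc + (if c = '-' then 0 else 1))

def get_ref_positions_alt (ref_align : String) (read_align : String) (ref_pos : Int) : List Int :=
  let before := pvBefore ref_align.toList 0
  (ref_align.toList.zip before).map (fun x => ref_pos + x.2 - (if x.1 = '-' then 1 else 0))

-- ===== PRECONDITION & SPEC =====
-- A raises AssertionError when the alignment strings have different lengths; Pre_ excludes exactly those.
def Pre_get_ref_positions (ref_align : String) (read_align : String) (ref_pos : Int) : Prop :=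
  ref_align.toList.length = read_align.toList.length
instance (ref_align : String) (read_align : String) (ref_pos : Int) : Decidable (Pre_get_ref_positions ref_align read_align ref_pos) := by unfold Pre_get_ref_positions; infer_instance

def pvWitness_get_ref_positions : String × String × Int := ("ACG--TCA", "--GGT--C", 1)

def Spec_get_ref_positions (ref_align : String) (read_align : String) (ref_pos : Int) (out : List Int) : Prop := out = get_ref_positions_alt ref_align read_align ref_pos
instance (ref_align : String) (read_align : String) (ref_pos : Int) (out : List Int) : Decidable (Spec_get_ref_positions ref_align read_align ref_pos out) := by unfold Spec_get_ref_positions; infer_instance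

-- ===== CLAIM (what is proved, stated in full; the proofs are below) =====
def Claim_equal_get_ref_positions : Prop := ∀ (ref_align : String) (read_align : String) (ref_pos : Int), Dom_get_ref_positions ref_align read_align ref_pos → Pre_get_ref_positions ref_align read_align ref_pos → Spec_get_ref_positions ref_align read_align ref_pos (get_ref_positions ref_align read_align ref_pos)

-- ===== LEMMAS AND PROOFS =====
theorem pvLoopA_eq (cs : List Char) : ∀ (acc p : Int),
    pvLoopA cs (p + acc) =
      (cs.zip (pvBefore cs acc)).map (fun x => p + x.2 - (if x.1 = '-' then 1 else 0)) := by
  induction cs with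
  | nil => intro acc p; rfl
  | cons c cs ih =>
    intro acc p
    by_cases h : c = '-'
    · simp [pvLoopA, pvBefore, h]
      exact ih acc p
    · simp [pvLoopA, pvBefore, h]
      have := ih (acc + 1) p
      rw [show p + acc + 1 = p + (acc + 1) by ring]
      simpa using this

-- ===== VERDICT (by name: the statement is the Claim_ definition above) =====
theorem get_ref_positions_spec : Claim_equal_get_ref_positions := by
  intro ra rd p _ _
  unfold Spec_get_ref_positions get_ref_positions get_ref_positions_alt
  have := pvLoopA_eq ra.toList 0 p
  simpa using this
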